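-- pv_equiv track=rewrite | github.com/vitalijhein/ai_knowledge_hub | src/my_utils/my_utils.py | sanitize_title_for_display
-- ===== SOURCE A (Python) =====
-- def sanitize_title_for_display(title):
--     # Characters not allowed in Windows filenames
--     invalid_chars = ['<', '>', ':', '"', '/', '\\', '|', '?', '*']
--     # Replace each invalid character with an underscore or any suitable character
--     for char in invalid_chars:
--         title = title.replace(char, '. ')
--     # Trim spaces at the end if any (since filenames cannot end with a space)
--     title = title.rstrip(' ')
--     # Ensure the title does not end with a dot (.)
--     if title.endswith('.'):
--         title = title[:-1] + '_'
--     return title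
-- ===== SOURCE B (Python) =====
-- def sanitize_title_for_display(title):
--     # Fused single pass over the string in REVERSE: trailing-space trimming,
--     # invalid-char replacement with '. ' and the trailing-dot -> '_' fix are
--     # all handled in one walk, instead of A's staged passes.
--     invalid = '<>:"/\\|?*'
--     rev = []           # result characters, collected back-to-front
--     tail = True        # still inside the (post-replacement) trailing region
--     for c in reversed(title):
--         if c in invalid:
--             if tail:
--                 # replacement '. ' would end as '. '; the space is trimmed and
--                 # the now-final '.' becomes '_'
--                 rev.append('_')
--             else:
--                 rev.append(' ')
--                 rev.append('.')
--             tail = False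
--         elif tail and c == ' ':
--             continue
--         elif tail and c == '.':
--             rev.append('_')
--             tail = False
--         else:
--             rev.append(c)
--             tail = False
--     return ''.join(reversed(rev))
-- ===== Notes on version B (the rewrite author's own statement) =====
-- stated objective: alternative
-- what changed: A's three staged passes (nine sequential full-string str.replace scans, then the trailing-space strip, then the trailing-dot fix) are fused into one walk over the string in reverse that trims the trailing region, replaces invalid characters and fixes the final dot in a single loop with a state flag.
import Mathlib
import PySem

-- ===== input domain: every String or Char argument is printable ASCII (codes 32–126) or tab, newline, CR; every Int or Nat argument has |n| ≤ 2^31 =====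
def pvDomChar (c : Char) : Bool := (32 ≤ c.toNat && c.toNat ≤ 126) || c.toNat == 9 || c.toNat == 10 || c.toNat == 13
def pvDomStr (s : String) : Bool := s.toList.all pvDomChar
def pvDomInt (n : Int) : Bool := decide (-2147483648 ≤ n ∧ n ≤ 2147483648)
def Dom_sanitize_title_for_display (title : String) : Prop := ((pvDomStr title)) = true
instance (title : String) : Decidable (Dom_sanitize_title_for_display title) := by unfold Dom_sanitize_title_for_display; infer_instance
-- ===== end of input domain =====

-- B replaces A's staged passes (nine full-string replaces, then trailing-space strip, then the
-- trailing-dot fix) by ONE fused walk over the string in reverse; same return value, proved below.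

-- ===== PORT A =====
-- title.rstrip(' ') — exact: Python's rstrip(' ') removes only trailing space characters
def pyRstripSpaces (l : List Char) : List Char := (l.reverse.dropWhile (· == ' ')).reverse

def sanitize_title_for_display (title : String) : String :=
  -- for char in invalid_chars: title = title.replace(char, '. ')
  let l1 := ['<', '>', ':', '"', '/', '\\', '|', '?', '*'].foldl
      (fun s c => PySem.Chars.replace s [c] ['.', ' ']) title.toList
  -- title = title.rstrip(' ')
  let l2 := pyRstripSpaces l1
  -- if title.endswith('.'): title = title[:-1] + '_'
  let l3 := if PySem.Chars.endswith l2 ['.'] then l2.dropLast ++ ['_'] else l2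
  String.ofList l3

-- ===== PORT B =====
-- the loop of Source B: walks the reversed character list; `tailf` = still inside the
-- (post-replacement) trailing region; emits the result characters back-to-front
def pvAltGo (tailf : Bool) : List Char → List Char
  | [] => []
  | c :: rest =>
    if PySem.Chars.isIn [c] ['<', '>', ':', '"', '/', '\\', '|', '?', '*'] then
      if tailf then '_' :: pvAltGo false rest
      else ' ' :: '.' :: pvAltGo false rest
    else if tailf && c == ' ' then pvAltGo tailf rest
    else if tailf && c == '.' then '_' :: pvAltGo false rest
    else c :: pvAltGo false rest

def sanitize_title_for_display_alt (title : String) : String :=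
  String.ofList (pvAltGo true title.toList.reverse).reverse

-- ===== PRECONDITION & SPEC =====
def Spec_sanitize_title_for_display (title : String) (out : String) : Prop := out = sanitize_title_for_display_alt title
instance (title : String) (out : String) : Decidable (Spec_sanitize_title_for_display title out) := by unfold Spec_sanitize_title_for_display; infer_instance

-- ===== CLAIM (what is proved, stated in full; the proofs are below) =====
def Claim_equal_sanitize_title_for_display : Prop := ∀ (title : String), Dom_sanitize_title_for_display title → Spec_sanitize_title_for_display title (sanitize_title_for_display title)

-- ===== LEMMAS AND PROOFS =====

-- abbreviation for B's membership test on one character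
def pvInv (c : Char) : Bool := PySem.Chars.isIn [c] ['<', '>', ':', '"', '/', '\\', '|', '?', '*']

-- reversed per-character replacement chunk
def pvG (c : Char) : List Char := if pvInv c then [' ', '.'] else [c]

-- '.' -> '_' on the head of the reversed (already space-trimmed) result
def pvFixHead (r : List Char) : List Char :=
  match r with
  | [] => []
  | c :: t => if c = '.' then '_' :: t else c :: t

theorem pvInv_eq_mem (c : Char) :
    pvInv c = (c ∈ (['<', '>', ':', '"', '/', '\\', '|', '?', '*'] : List Char) : Bool) := by
  unfold pvInv
  by_cases h : c ∈ (['<', '>', ':', '"', '/', '\\', '|', '?', '*'] : List Char)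
  · simp only [h, decide_true]
    exact (PySem.Chars.isIn_iff_infix _ _).mpr ((List.singleton_infix_iff c _).mpr h)
  · simp only [h, decide_false]
    exact (PySem.Chars.isIn_eq_false_iff _ _).mpr (fun hinf => h ((List.singleton_infix_iff c _).mp hinf))

-- single-character replace is a per-character flatMap
theorem replace_single (c : Char) (new : List Char) (s : List Char) :
    PySem.Chars.replace s [c] new = s.flatMap (fun d => if d = c then new else [d]) := by
  show PySem.Chars.replace.go [c] new s.length s [] = _
  suffices h : ∀ (l acc : List Char),
      PySem.Chars.replace.go [c] new l.length l acc
        = acc.reverse ++ l.flatMap (fun d => if d = c then new else [d]) by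
    simpa using h s []
  intro l
  induction l with
  | nil => intro acc; simp [PySem.Chars.replace.go]
  | cons d t ih =>
      intro acc
      simp only [List.length_cons, PySem.Chars.replace.go, List.isPrefixOf, List.flatMap_cons]
      by_cases hd : d = c
      · subst hd
        simp [ih (new.reverse ++ acc), List.append_assoc]
      · have : (c == d) = false := beq_eq_false_iff_ne.mpr (Ne.symm hd)
        simp [this, ih (d :: acc), hd]

-- the nine-replace foldl is a per-character flatMap with the reversed pvG chunks
theorem fold_replace_eq (s : List Char) :
    ['<', '>', ':', '"', '/', '\\', '|', '?', '*'].foldl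
        (fun t c => PySem.Chars.replace t [c] ['.', ' ']) s
      = s.flatMap (fun c => (pvG c).reverse) := by
  simp only [List.foldl_cons, List.foldl_nil, replace_single, List.flatMap_assoc]
  apply List.flatMap_congr
  intro d _
  simp only [pvG, pvInv_eq_mem]
  by_cases h1 : d = '<'
  · subst h1; decide
  by_cases h2 : d = '>'
  · subst h2; decide
  by_cases h3 : d = ':'
  · subst h3; decide
  by_cases h4 : d = '"'
  · subst h4; decide
  by_cases h5 : d = '/'
  · subst h5; decide
  by_cases h6 : d = '\\'
  · subst h6; decide
  by_cases h7 : d = '|'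
  · subst h7; decide
  by_cases h8 : d = '?'
  · subst h8; decide
  by_cases h9 : d = '*'
  · subst h9; decide
  simp [h1, h2, h3, h4, h5, h6, h7, h8, h9]

theorem rev_flatMap (l : List Char) (f : Char → List Char) :
    (l.flatMap f).reverse = l.reverse.flatMap (fun x => (f x).reverse) := by
  induction l with
  | nil => simp
  | cons a t ih => simp [ih]

-- the non-trailing phase of B's loop is exactly the reversed per-character mapping
theorem altGo_false (rl : List Char) : pvAltGo false rl = rl.flatMap pvG := by
  induction rl with
  | nil => simp [pvAltGo]
  | cons c rest ih =>
      show (if pvInv c then _ else _) = _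
      by_cases h : PySem.Chars.isIn [c] ['<', '>', ':', '"', '/', '\\', '|', '?', '*'] = true
      · simp [h, ih, pvG, pvInv]
      · simp only [Bool.not_eq_true] at h
        simp [h, ih, pvG, pvInv]

-- the trailing phase is dropWhile-space followed by the head fix, on the same mapping
theorem altGo_true (rl : List Char) :
    pvAltGo true rl = pvFixHead ((rl.flatMap pvG).dropWhile (· == ' ')) := by
  induction rl with
  | nil => simp [pvAltGo, pvFixHead]
  | cons c rest ih =>
      show (if pvInv c then _ else _) = _
      by_cases h : pvInv c = true
      · have hG : pvG c = [' ', '.'] := by simp [pvG, h]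
        simp [h, hG, pvFixHead, altGo_false]
      · simp only [Bool.not_eq_true] at h
        have hG : pvG c = [c] := by simp [pvG, h]
        by_cases hs : c = ' '
        · subst hs
          simp [h, hG, ih]
        · by_cases hd : c = '.'
          · subst hd
            simp [h, hG, pvFixHead, altGo_false]
          · simp [h, hG, hs, hd, pvFixHead, altGo_false]

-- the tail of A (rstrip + endswith fix) for ANY character list, against B's reversed form
theorem tail_eq (m : List Char) :
    (if PySem.Chars.endswith (pyRstripSpaces m) ['.']
       then (pyRstripSpaces m).dropLast ++ ['_'] else pyRstripSpaces m)
      = (pvFixHead (m.reverse.dropWhile (· == ' '))).reverse := by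
  unfold pyRstripSpaces
  cases hr : m.reverse.dropWhile (· == ' ') with
  | nil => simp [pvFixHead]; decide
  | cons c t =>
      have hend : PySem.Chars.endswith (c :: t).reverse ['.'] = (c = '.' : Bool) := by
        by_cases hc : c = '.'
        · subst hc
          exact (PySem.Chars.endswith_iff _ _).mpr (by simp)
        · simp only [hc, decide_false]
          rw [Bool.eq_false_iff]
          intro hcon
          have := (PySem.Chars.endswith_iff _ _).mp hcon
          rw [List.reverse_cons] at this
          exact hc ((by simpa [List.suffix_iff_eq_append] using this : '.' = c)).symm
      rw [hend]
      by_cases hc : c = '.'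
      · subst hc
        simp [pvFixHead]
      · simp [hc, pvFixHead]

-- ===== VERDICT (by name: the statement is the Claim_ definition above) =====
theorem sanitize_title_for_display_spec : Claim_equal_sanitize_title_for_display := by
  intro title _
  unfold Spec_sanitize_title_for_display sanitize_title_for_display sanitize_title_for_display_alt
  simp only [fold_replace_eq, altGo_true, tail_eq, rev_flatMap, List.reverse_reverse]
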